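-- pv_equiv track=rewrite | github.com/Hand-and-Machine/extruder-turtle-Rhino | extruder_turtle/pattern_slicing.py | pad_pattern
-- ===== SOURCE A (Python) =====
-- def rotate_pattern(pattern_row,angle,step_shift=False):
-- 	if (pattern_row is False):
-- 		return False
-- 	steps = len(pattern_row)
-- 	steps_per_angle = steps/360.0
-- 	if (step_shift is False):
-- 		step_shift = int(steps_per_angle*angle)
-- 	rotated_pattern_row = []
-- 	index = 0
-- 	for i in range (step_shift,len(pattern_row)+step_shift):
-- 		ii = i%len(pattern_row)
-- 		rotated_pattern_row.append(pattern_row[ii])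
-- 	return rotated_pattern_row
--
-- def pad_pattern(pattern_row, pad_beginning=4, pad_end=2, reverse=False):
-- 	# pad pattern
-- 	new_pattern_row=[]
-- 	old_pattern_row=[]
-- 	for i in range (0,len(pattern_row)):
-- 		new_pattern_row.append(pattern_row[i])
-- 		old_pattern_row.append(pattern_row[i])
--
-- 	if (reverse):
-- 		new_pattern_row.reverse()
-- 		new_pattern_row = rotate_pattern(new_pattern_row,angle=0,step_shift=-1)
-- 		old_pattern_row.reverse()
-- 		old_pattern_row = rotate_pattern(old_pattern_row,angle=0,step_shift=-1)
--
-- 	for i in range (pad_end,len(new_pattern_row)-pad_beginning-1):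
-- 		for j in range (-pad_end,pad_beginning+1):
-- 			if (old_pattern_row[i+j]<=.5):
-- 				new_pattern_row[i]=0
--
-- 	if (new_pattern_row[0]<= .5):
-- 		for j in range (len(new_pattern_row)-pad_end,len(new_pattern_row)):
-- 			new_pattern_row[j]=0
--
-- 	if (new_pattern_row[len(new_pattern_row)-1]<=.5):
-- 		for j in range (0,pad_beginning):
-- 			new_pattern_row[j]=0
--
-- 	return new_pattern_row
-- ===== SOURCE B (Python) =====
-- def pad_pattern(pattern_row, pad_beginning=4, pad_end=2, reverse=False):
--     n = len(pattern_row)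
--     if reverse:
--         new_pattern_row = [pattern_row[0]] + pattern_row[1:][::-1] if n else []
--     else:
--         new_pattern_row = list(pattern_row)
--     row = new_pattern_row
--
--     new_pattern_row = list(row)
--     if pad_beginning + pad_end >= 0 and pad_end < n - pad_beginning - 1:
--         # prefix counts of below-threshold cells: bad[k] = #{t < k : row[t] <= .5}
--         bad = [0] * (n + 1)
--         for k in range(n):
--             bad[k + 1] = bad[k] + (1 if row[k] <= .5 else 0)
--         for i in range(pad_end, n - pad_beginning - 1):
--             # any below-threshold cell in row[i-pad_end .. i+pad_beginning] ?
--             if bad[i + pad_beginning + 1] > bad[i - pad_end]: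
--                 new_pattern_row[i] = 0
--
--     if new_pattern_row[0] <= .5:
--         for j in range(n - pad_end, n):
--             new_pattern_row[j] = 0
--
--     if new_pattern_row[n - 1] <= .5:
--         for j in range(0, pad_beginning):
--             new_pattern_row[j] = 0
--
--     return new_pattern_row
-- ===== Notes on version B (the rewrite author's own statement) =====
-- stated objective: alternative
-- what changed: A rescans the whole (pad_end+pad_beginning+1)-cell window for every cell; B builds one prefix-count array of below-threshold cells and tests each window with a single O(1) comparison, and builds the reversed row by slicing instead of A's rotate-by-(-1) append loop.
import Mathlib
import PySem

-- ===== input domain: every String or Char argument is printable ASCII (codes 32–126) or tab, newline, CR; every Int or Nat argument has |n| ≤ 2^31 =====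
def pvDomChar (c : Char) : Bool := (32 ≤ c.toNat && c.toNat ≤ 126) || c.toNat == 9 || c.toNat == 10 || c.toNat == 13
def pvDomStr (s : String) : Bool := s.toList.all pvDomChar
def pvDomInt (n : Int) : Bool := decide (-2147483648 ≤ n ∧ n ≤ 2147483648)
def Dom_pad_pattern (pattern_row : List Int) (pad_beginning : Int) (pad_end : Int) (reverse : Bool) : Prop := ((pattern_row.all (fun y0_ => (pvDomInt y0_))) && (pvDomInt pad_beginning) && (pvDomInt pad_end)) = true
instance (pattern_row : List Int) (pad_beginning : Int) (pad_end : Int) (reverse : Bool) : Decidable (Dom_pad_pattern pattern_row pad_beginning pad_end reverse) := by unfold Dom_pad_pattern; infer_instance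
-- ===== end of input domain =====

-- B replaces A's per-cell rescan of the whole window by one prefix-count array
-- queried once per cell (objective: alternative; trades A's window rescans for one
-- extra prefix array). Return-value equivalence only:
-- A mutates nothing the caller passed (it works on copies), and neither does B.

-- ===== PORT A =====
-- helper rotate_pattern(pattern_row, angle, step_shift); in A it is only called
-- with an explicit step_shift, so the angle-derived default is never used and the
-- `angle` parameter is kept (unused) for fidelity.
def rotate_pattern (pattern_row : List Int) (angle : Int) (step_shift : Int) : List Int :=
  (PySem.List.pyRange step_shift ((pattern_row.length : Int) + step_shift)).foldl
    (fun acc i =>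
      acc ++ [PySem.List.pyGetD pattern_row (PySem.Int.mod i (pattern_row.length : Int)) 1])
    []

def pad_pattern (pattern_row : List Int) (pad_beginning : Int) (pad_end : Int) (reverse : Bool) : List Int :=
  -- copy loop building new_pattern_row and old_pattern_row
  let new0 : List Int :=
    (PySem.List.pyRange 0 (pattern_row.length : Int)).foldl
      (fun acc i => acc ++ [PySem.List.pyGetD pattern_row i 1]) []
  let old0 : List Int :=
    (PySem.List.pyRange 0 (pattern_row.length : Int)).foldl
      (fun acc i => acc ++ [PySem.List.pyGetD pattern_row i 1]) []
  let new1 : List Int := if reverse then rotate_pattern new0.reverse 0 (-1) else new0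
  let old1 : List Int := if reverse then rotate_pattern old0.reverse 0 (-1) else old0
  let n : Int := (new1.length : Int)
  -- nested padding loop: pattern_row values are ints, so `<= .5` is `≤ 0`
  let new2 : List Int :=
    (PySem.List.pyRange pad_end (n - pad_beginning - 1)).foldl
      (fun acc i =>
        (PySem.List.pyRange (-pad_end) (pad_beginning + 1)).foldl
          (fun acc2 j =>
            if PySem.List.pyGetD old1 (i + j) 1 ≤ 0 then PySem.List.pySetD acc2 i 0 else acc2)
          acc)
      new1
  let new3 : List Int :=
    if PySem.List.pyGetD new2 0 1 ≤ 0 then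
      (PySem.List.pyRange (n - pad_end) n).foldl (fun acc j => PySem.List.pySetD acc j 0) new2
    else new2
  let new4 : List Int :=
    if PySem.List.pyGetD new3 (n - 1) 1 ≤ 0 then
      (PySem.List.pyRange 0 pad_beginning).foldl (fun acc j => PySem.List.pySetD acc j 0) new3
    else new3
  new4

-- ===== PORT B =====
def pad_pattern_alt (pattern_row : List Int) (pad_beginning : Int) (pad_end : Int) (reverse : Bool) : List Int :=
  let n : Int := (pattern_row.length : Int)
  -- `[pattern_row[0]] + pattern_row[1:][::-1] if n else []`
  let row : List Int :=
    if reverse then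
      if n ≠ 0 then
        [PySem.List.pyGetD pattern_row 0 1] ++ (PySem.List.slice? (PySem.List.slice pattern_row (some 1) none) none none (-1)).getD []
      else []
    else pattern_row
  let new1 : List Int :=
    if pad_beginning + pad_end ≥ 0 ∧ pad_end < n - pad_beginning - 1 then
      -- prefix counts: bad[k] = number of below-threshold cells among row[:k]
      let bad : List Int :=
        (row.foldl
          (fun (p : List Int × Int) x =>
            let cc : Int := if x ≤ 0 then p.2 + 1 else p.2
            (p.1 ++ [cc], cc))
          ([0], 0)).1
      (PySem.List.pyRange pad_end (n - pad_beginning - 1)).foldl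
        (fun acc i =>
          if PySem.List.pyGetD bad (i - pad_end) 0 < PySem.List.pyGetD bad (i + pad_beginning + 1) 0
          then PySem.List.pySetD acc i 0 else acc)
        row
    else row
  let new2 : List Int :=
    if PySem.List.pyGetD new1 0 1 ≤ 0 then
      (PySem.List.pyRange (n - pad_end) n).foldl (fun acc j => PySem.List.pySetD acc j 0) new1
    else new1
  let new3 : List Int :=
    if PySem.List.pyGetD new2 (n - 1) 1 ≤ 0 then
      (PySem.List.pyRange 0 pad_beginning).foldl (fun acc j => PySem.List.pySetD acc j 0) new2
    else new2
  new3

-- ===== PRECONDITION & SPEC =====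
-- Pre_ excludes EXACTLY the inputs on which A raises IndexError (and nothing else):
-- the empty row, and pad sizes that make a guarded write index pass beyond Python's
-- negative-index range — which happens precisely when a below-threshold cell lies in
-- the window (or at the row end) that guards the offending write; B's own algorithm
-- raises IndexError on exactly the same inputs, so there is nothing to match there.
def Pre_pad_pattern (pattern_row : List Int) (pad_beginning : Int) (pad_end : Int) (reverse : Bool) : Prop :=
  let n : Int := (pattern_row.length : Int)
  let prow : List Int :=
    if reverse then pattern_row.take 1 ++ (pattern_row.drop 1).reverse else pattern_row
  1 ≤ n ∧
  -- main loop: guarded write at index i < -n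
  ¬(0 ≤ pad_end + pad_beginning ∧ pad_end ≤ min (n - pad_beginning - 2) (-n - 1) ∧
      ∃ x ∈ prow.take (min (n - pad_beginning - 2) (-n - 1) + pad_beginning + 1).toNat, x ≤ 0) ∧
  -- main loop: guarded write at index i ≥ n
  ¬(0 ≤ pad_end + pad_beginning ∧ pad_end ≤ n - pad_beginning - 2 ∧ pad_beginning ≤ -2 ∧
      ∃ x ∈ (prow.take (n - 1).toNat).drop (n - pad_end).toNat, x ≤ 0) ∧
  -- first tail loop: guarded write at index n - pad_end < -n
  ¬(2 * n < pad_end ∧ prow.getD 0 1 ≤ 0) ∧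
  -- second tail loop: guarded write at index n (pad_beginning > n)
  ¬(n < pad_beginning ∧ (prow.getD (prow.length - 1) 1 ≤ 0 ∨ (1 ≤ pad_end ∧ prow.getD 0 1 ≤ 0)))

instance (pattern_row : List Int) (pad_beginning : Int) (pad_end : Int) (reverse : Bool) : Decidable (Pre_pad_pattern pattern_row pad_beginning pad_end reverse) := by unfold Pre_pad_pattern; infer_instance

def pvWitness_pad_pattern : List Int × Int × Int × Bool := ([1, 0, 2, 1, 1, 1, 0, 2], 4, 2, false)

def Spec_pad_pattern (pattern_row : List Int) (pad_beginning : Int) (pad_end : Int) (reverse : Bool) (out : List Int) : Prop := out = pad_pattern_alt pattern_row pad_beginning pad_end reverse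
instance (pattern_row : List Int) (pad_beginning : Int) (pad_end : Int) (reverse : Bool) (out : List Int) : Decidable (Spec_pad_pattern pattern_row pad_beginning pad_end reverse out) := by unfold Spec_pad_pattern; infer_instance

-- ===== CLAIM (what is proved, stated in full; the proofs are below) =====
def Claim_equal_pad_pattern : Prop := ∀ (pattern_row : List Int) (pad_beginning : Int) (pad_end : Int) (reverse : Bool), Dom_pad_pattern pattern_row pad_beginning pad_end reverse → Pre_pad_pattern pattern_row pad_beginning pad_end reverse → Spec_pad_pattern pattern_row pad_beginning pad_end reverse (pad_pattern pattern_row pad_beginning pad_end reverse)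

-- ===== LEMMAS AND PROOFS =====

lemma pySetD_idem {α : Type} (xs : List α) (i : Int) (v w : α) :
    PySem.List.pySetD (PySem.List.pySetD xs i v) i w = PySem.List.pySetD xs i w := by
  simp only [PySem.List.pySetD, PySem.List.pySet?]
  rcases h : PySem.List.pyIdx? xs.length i with _ | k
  · simp [h]
  · simp only [Option.map_some, Option.getD_some, List.length_set, h, List.set_set]

lemma foldl_if_pySetD (L : List Int) (p : Int → Prop) [DecidablePred p] (i : Int) (acc : List Int) :
    L.foldl (fun a j => if p j then PySem.List.pySetD a i 0 else a) acc
      = if L.any (fun j => decide (p j)) then PySem.List.pySetD acc i 0 else acc := by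
  induction L generalizing acc with
  | nil => simp
  | cons x t ih =>
    simp only [List.foldl_cons, List.any_cons]
    by_cases hx : p x
    · simp [hx, ih, pySetD_idem]
    · simp [hx, ih]

lemma map_pyGetD_range_take (xs : List Int) (k : Nat) (hk : k ≤ xs.length) (d : Int) :
    (List.range k).map (fun j => xs.getD j d) = xs.take k := by
  apply List.ext_getElem
  · simp [hk]
  · intro n h1 h2
    have hn : n < xs.length := by simp at h2; omega
    simp [List.getD_eq_getElem?_getD, List.getElem?_eq_getElem hn,
      List.getElem_take]

lemma copy_loop_eq (xs : List Int) :
    (PySem.List.pyRange 0 (xs.length : Int)).foldl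
      (fun acc i => acc ++ [PySem.List.pyGetD xs i 1]) [] = xs := by
  rw [PySem.List.foldl_append_singleton_eq_map]
  have := PySem.List.map_pyGetD_pyRange_zero xs 1
  simpa [PySem.List.len] using this

lemma slice_rev_eq (x : Int) (t : List Int) :
    (PySem.List.slice? (PySem.List.slice (x :: t) (some 1) none) none none (-1)).getD []
      = t.reverse := by
  rw [PySem.List.slice_from_one, PySem.List.slice?_none_none_neg_one]
  simp

lemma rotate_reverse_eq (x : Int) (t : List Int) :
    rotate_pattern (x :: t).reverse 0 (-1) = x :: t.reverse := by
  unfold rotate_pattern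
  rw [PySem.List.foldl_append_singleton_eq_map]
  have hm : ((x :: t).reverse.length : Int) = (t.length : Int) + 1 := by simp
  have hcons : PySem.List.pyRange (-1) (((x :: t).reverse.length : Int) + -1)
      = -1 :: PySem.List.pyRange 0 (((x :: t).reverse.length : Int) + -1) := by
    rw [PySem.List.pyRange_one_cons (by omega)]; norm_num
  rw [hcons]
  simp only [List.map_cons, List.nil_append]
  have hmod1 : PySem.Int.mod (-1) ((x :: t).reverse.length : Int) = (t.length : Int) := by
    rw [PySem.Int.mod_eq_emod_of_pos (by omega)]
    have h1 : ((-1 : Int) + ((x :: t).reverse.length : Int) * 1) % ((x :: t).reverse.length : Int)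
        = (-1 : Int) % ((x :: t).reverse.length : Int) := Int.add_mul_emod_self_left _ _ _
    rw [← h1, Int.emod_eq_of_lt (by simp) (by simp)]
    simp
  have hhead : PySem.List.pyGetD (x :: t).reverse
      (PySem.Int.mod (-1) ((x :: t).reverse.length : Int)) 1 = x := by
    rw [hmod1, PySem.List.pyGetD_natCast]
    have : t.length < (x :: t).reverse.length := by simp
    rw [List.getD_eq_getElem _ _ this, List.getElem_reverse]
    simp
  rw [hhead]
  congr 1
  rw [PySem.List.pyRange_one]
  rw [List.map_map]
  have harg : ∀ k ∈ List.range ((((x :: t).reverse.length : Int) + -1 - 0).toNat),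
      ((fun i => PySem.List.pyGetD (x :: t).reverse (PySem.Int.mod i ((x :: t).reverse.length : Int)) 1) ∘ fun (k : Nat) => 0 + (k : Int)) k
        = (x :: t).reverse.getD k 1 := by
    intro k hk
    simp only [Function.comp, zero_add]
    have hkm : (k : Int) < ((x :: t).reverse.length : Int) := by
      simp at hk ⊢; omega
    have : PySem.Int.mod (k : Int) ((x :: t).reverse.length : Int) = (k : Int) := by
      rw [PySem.Int.mod_eq_emod_of_pos (by omega)]
      exact Int.emod_eq_of_lt (by omega) hkm
    rw [this, PySem.List.pyGetD_natCast]
  rw [List.map_congr_left harg]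
  have hlen : ((((x :: t).reverse.length : Int) + -1 - 0).toNat) = (x :: t).reverse.length - 1 := by omega
  rw [hlen, map_pyGetD_range_take _ _ (by omega) 1]
  rw [← List.dropLast_eq_take]
  simp

lemma bad_aux (xs : List Int) (acc : List Int) (c : Int) :
    (xs.foldl
      (fun (p : List Int × Int) x =>
        let cc : Int := if x ≤ 0 then p.2 + 1 else p.2
        (p.1 ++ [cc], cc))
      (acc, c)).1
    = acc ++ (List.range xs.length).map
        (fun k => c + ((xs.take (k + 1)).countP (fun x => decide (x ≤ 0)) : Int)) := by
  induction xs generalizing acc c with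
  | nil => simp
  | cons x t ih =>
    simp only [List.foldl_cons, List.length_cons]
    rw [ih]
    rw [List.range_succ_eq_map]
    simp only [List.map_cons, List.map_map]
    rw [List.append_assoc]
    congr 1
    refine congrArg₂ List.cons ?_ ?_
    · simp [List.countP_cons]
      split_ifs <;> simp
    · apply List.map_congr_left
      intro k hk
      simp only [Function.comp, Nat.succ_eq_add_one, List.take_succ_cons, List.countP_cons, decide_eq_true_eq]
      split_ifs <;> simp <;> omega

lemma bad_getD (row : List Int) (k : Nat) (hk : k ≤ row.length) :
    ((row.foldl
      (fun (p : List Int × Int) x =>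
        let cc : Int := if x ≤ 0 then p.2 + 1 else p.2
        (p.1 ++ [cc], cc))
      ([0], 0)).1).getD k 0
    = ((row.take k).countP (fun x => decide (x ≤ 0)) : Int) := by
  rw [bad_aux]
  rcases k with _ | k
  · simp
  · rw [List.getD_eq_getElem?_getD]
    rw [List.getElem?_append_right (by simp)]
    simp only [List.length_singleton]
    rw [List.getElem?_map, List.getElem?_range (by omega)]
    simp

lemma count_lt_iff (row : List Int) (a b : Nat) (hab : a ≤ b) (hb : b ≤ row.length) :
    ((row.take a).countP (fun x => decide (x ≤ 0)) : Int)
        < ((row.take b).countP (fun x => decide (x ≤ 0)) : Int)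
      ↔ ∃ k : Nat, a ≤ k ∧ k < b ∧ row.getD k 1 ≤ 0 := by
  have hsplit : row.take b = row.take a ++ (row.take b).drop a := by
    have h := List.take_append_drop a (row.take b)
    rw [List.take_take, min_eq_left hab] at h
    exact h.symm
  constructor
  · intro hlt
    rw [hsplit, List.countP_append] at hlt
    have hpos : 0 < ((row.take b).drop a).countP (fun x => decide (x ≤ 0)) := by omega
    rw [List.countP_pos_iff] at hpos
    obtain ⟨y, hy, hyp⟩ := hpos
    rw [List.mem_iff_getElem] at hy
    obtain ⟨j, hj, hjy⟩ := hy
    have hjlen : j < b - a := by simp at hj; omega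
    refine ⟨a + j, by omega, by omega, ?_⟩
    have hval : ((row.take b).drop a)[j] = row[a + j]'(by omega) := by
      simp [List.getElem_drop, List.getElem_take]
    rw [List.getD_eq_getElem _ _ (by omega : a + j < row.length)]
    rw [hjy] at hval
    rw [← hval]
    simpa using hyp
  · intro ⟨k, hak, hkb, hk⟩
    rw [hsplit, List.countP_append]
    have hpos : 0 < ((row.take b).drop a).countP (fun x => decide (x ≤ 0)) := by
      rw [List.countP_pos_iff]
      refine ⟨row[k]'(by omega), ?_, ?_⟩
      · rw [List.mem_iff_getElem]
        refine ⟨k - a, by simp; omega, ?_⟩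
        have : ((row.take b).drop a)[k - a]'(by simp; omega) = row[a + (k - a)]'(by omega) := by
          simp [List.getElem_drop, List.getElem_take]
        rw [this]
        congr 1
        omega
      · rw [List.getD_eq_getElem _ _ (by omega : k < row.length)] at hk
        simpa using hk
    omega

lemma cond_eq (row : List Int) (pb pe i : Int)
    (hwin : 0 ≤ pe + pb) (hlo : pe ≤ i) (hhi : i < (row.length : Int) - pb - 1) :
    ((PySem.List.pyRange (-pe) (pb + 1)).any
        (fun j => decide (PySem.List.pyGetD row (i + j) 1 ≤ 0)))
      = decide (PySem.List.pyGetD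
            ((row.foldl
              (fun (p : List Int × Int) x =>
                let cc : Int := if x ≤ 0 then p.2 + 1 else p.2
                (p.1 ++ [cc], cc))
              ([0], 0)).1) (i - pe) 0
          < PySem.List.pyGetD
            ((row.foldl
              (fun (p : List Int × Int) x =>
                let cc : Int := if x ≤ 0 then p.2 + 1 else p.2
                (p.1 ++ [cc], cc))
              ([0], 0)).1) (i + pb + 1) 0) := by
  have ha0 : (0:Int) ≤ i - pe := by omega
  have hb0 : (0:Int) ≤ i + pb + 1 := by omega
  have hbn : i + pb + 1 ≤ (row.length : Int) := by omega
  rw [PySem.List.pyGetD_of_nonneg _ _ ha0, PySem.List.pyGetD_of_nonneg _ _ hb0]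
  rw [bad_getD row (i - pe).toNat (by omega), bad_getD row (i + pb + 1).toNat (by omega)]
  rw [Bool.eq_iff_iff]
  rw [decide_eq_true_iff]
  rw [count_lt_iff row _ _ (by omega) (by omega)]
  rw [List.any_eq_true]
  constructor
  · intro ⟨j, hjmem, hjp⟩
    rw [PySem.List.mem_pyRange_one] at hjmem
    refine ⟨(i + j).toNat, by omega, by omega, ?_⟩
    rw [decide_eq_true_iff] at hjp
    rw [PySem.List.pyGetD_of_nonneg _ _ (by omega)] at hjp
    exact hjp
  · intro ⟨k, hak, hkb, hk⟩
    refine ⟨(k : Int) - i, ?_, ?_⟩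
    · rw [PySem.List.mem_pyRange_one]
      omega
    · rw [decide_eq_true_iff]
      rw [show i + ((k : Int) - i) = (k : Int) by ring, PySem.List.pyGetD_natCast]
      exact hk

-- the padding loop of A equals the guarded prefix-count loop of B
lemma mid_eq (row : List Int) (pb pe : Int) :
    (PySem.List.pyRange pe ((row.length : Int) - pb - 1)).foldl
      (fun acc i =>
        (PySem.List.pyRange (-pe) (pb + 1)).foldl
          (fun acc2 j =>
            if PySem.List.pyGetD row (i + j) 1 ≤ 0 then PySem.List.pySetD acc2 i 0 else acc2)
          acc)
      row
    = if pb + pe ≥ 0 ∧ pe < (row.length : Int) - pb - 1 then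
        (PySem.List.pyRange pe ((row.length : Int) - pb - 1)).foldl
          (fun acc i =>
            if PySem.List.pyGetD
                ((row.foldl
                  (fun (p : List Int × Int) x =>
                    let cc : Int := if x ≤ 0 then p.2 + 1 else p.2
                    (p.1 ++ [cc], cc))
                  ([0], 0)).1) (i - pe) 0
              < PySem.List.pyGetD
                ((row.foldl
                  (fun (p : List Int × Int) x =>
                    let cc : Int := if x ≤ 0 then p.2 + 1 else p.2
                    (p.1 ++ [cc], cc))
                  ([0], 0)).1) (i + pb + 1) 0
            then PySem.List.pySetD acc i 0 else acc)
          row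
      else row := by
  by_cases hg : pb + pe ≥ 0
  · by_cases hr : pe < (row.length : Int) - pb - 1
    · rw [if_pos ⟨hg, hr⟩]
      apply PySem.List.foldl_congr_mem
      intro acc i hi
      rw [PySem.List.mem_pyRange_one] at hi
      rw [foldl_if_pySetD]
      rw [cond_eq row pb pe i (by omega) hi.1 hi.2]
      simp only [decide_eq_true_eq]
    · rw [not_lt] at hr
      rw [if_neg (fun hc => absurd hc.2 (not_lt.mpr hr))]
      rw [PySem.List.pyRange_one_eq_nil hr]
      rfl
  · rw [if_neg (by tauto)]
    have hwin : PySem.List.pyRange (-pe) (pb + 1) = [] :=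
      PySem.List.pyRange_one_eq_nil (by omega)
    calc (PySem.List.pyRange pe ((row.length : Int) - pb - 1)).foldl
          (fun acc i =>
            (PySem.List.pyRange (-pe) (pb + 1)).foldl
              (fun acc2 j =>
                if PySem.List.pyGetD row (i + j) 1 ≤ 0 then PySem.List.pySetD acc2 i 0 else acc2)
              acc)
          row
        = (PySem.List.pyRange pe ((row.length : Int) - pb - 1)).foldl (fun acc _ => acc) row := by
          apply PySem.List.foldl_congr_mem
          intro acc i _
          rw [hwin]
          rfl
      _ = row := PySem.List.foldl_ignore _ _

-- B's preprocessing equals A's reverse-and-rotate preprocessing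
lemma row_eq (pattern_row : List Int) (reverse : Bool) :
    (if reverse then
        if (pattern_row.length : Int) ≠ 0 then
          [PySem.List.pyGetD pattern_row 0 1]
            ++ (PySem.List.slice? (PySem.List.slice pattern_row (some 1) none) none none (-1)).getD []
        else []
      else pattern_row)
    = (if reverse then rotate_pattern pattern_row.reverse 0 (-1) else pattern_row) := by
  cases reverse with
  | false => rfl
  | true =>
    cases pattern_row with
    | nil => simp [rotate_pattern, PySem.List.pyRange_one_eq_nil]
    | cons x t =>
      simp only [if_true]
      rw [rotate_reverse_eq]
      rw [if_pos (show ((x :: t).length : Int) ≠ 0 by simp; omega)]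
      rw [slice_rev_eq]
      simp [PySem.List.pyGetD]

lemma row_len (pattern_row : List Int) (reverse : Bool) :
    ((if reverse then rotate_pattern pattern_row.reverse 0 (-1) else pattern_row).length : Int)
      = (pattern_row.length : Int) := by
  cases reverse with
  | false => rfl
  | true =>
    cases pattern_row with
    | nil => simp [rotate_pattern, PySem.List.pyRange_one_eq_nil]
    | cons x t => rw [rotate_reverse_eq]; simp

-- the two ports agree on every input (Pre_ keeps the admitted inputs inside A's
-- non-raising domain; the port functions themselves agree everywhere)
lemma ports_agree (pattern_row : List Int) (pad_beginning pad_end : Int) (reverse : Bool) :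
    pad_pattern pattern_row pad_beginning pad_end reverse
      = pad_pattern_alt pattern_row pad_beginning pad_end reverse := by
  unfold pad_pattern pad_pattern_alt
  simp only [copy_loop_eq]
  rw [row_eq]
  rw [mid_eq]
  rw [row_len]

-- ===== VERDICT (by name: the statement is the Claim_ definition above) =====
theorem pad_pattern_spec : Claim_equal_pad_pattern := by
  intro pattern_row pb pe rev _ _
  exact ports_agree pattern_row pb pe rev
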